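-- pv_equiv track=rewrite | github.com/Matteo-Candi/Master-Thesis | benchmark/Python_formatted.py | decode_cyclic
-- ===== SOURCE A (Python) =====
-- def decode_cyclic(s):
--     output = []
--     i = 0
--     while i <= len(s) - 3:
--         x = s[i + 2] + s[i: i + 2]
--         output.append(x)
--         i += 3
--     return "".join(output) + s[i:]
-- ===== SOURCE B (Python) =====
-- def decode_cyclic(s):
--     out = []
--     buf = []
--     for ch in s:
--         if len(buf) == 2:
--             out.append(ch)
--             out.extend(buf)
--             buf.clear()
--         else:
--             buf.append(ch)
--     out.extend(buf)
--     return "".join(out)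
-- ===== Notes on version B (the rewrite author's own statement) =====
-- stated objective: alternative
-- what changed: Replaces A's index-arithmetic while-loop over 3-char slices (s[i+2] + s[i:i+2], trailing s[i:]) with a streaming single pass over individual characters driven by a 2-char pending buffer: every third character is emitted immediately followed by the flushed buffer, and the leftover buffer is the unchanged tail; no indexing or slicing at all.
import Mathlib
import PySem

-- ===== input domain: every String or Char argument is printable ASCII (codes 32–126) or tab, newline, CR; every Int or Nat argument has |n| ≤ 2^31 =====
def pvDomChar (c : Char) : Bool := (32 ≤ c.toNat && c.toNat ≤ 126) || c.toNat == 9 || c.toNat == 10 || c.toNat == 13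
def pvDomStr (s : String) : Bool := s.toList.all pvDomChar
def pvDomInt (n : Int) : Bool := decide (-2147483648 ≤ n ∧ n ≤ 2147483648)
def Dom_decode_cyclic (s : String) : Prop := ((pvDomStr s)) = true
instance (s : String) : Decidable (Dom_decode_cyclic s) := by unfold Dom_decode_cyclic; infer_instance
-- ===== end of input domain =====

-- B replaces A's index-arithmetic slicing loop with a streaming single pass over the characters,
-- buffering up to two pending chars and flushing on each third (alternative decomposition; same cost).

-- ===== PORT A =====
-- the while-loop of A: state (i, output), condition i <= len(s) - 3
def decode_cyclic_loop (cs : List Char) (i : Nat) (output : List (List Char)) : List Char :=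
  if _h : i + 3 ≤ cs.length then
    -- x = s[i + 2] + s[i : i + 2]
    let x := PySem.List.pyGetD cs ((i : Int) + 2) ' ' :: PySem.List.slice cs (some (i : Int)) (some ((i : Int) + 2))
    decode_cyclic_loop cs (i + 3) (output ++ [x])
  else
    -- "".join(output) + s[i:]
    output.flatten ++ PySem.List.slice cs (some (i : Int)) none
termination_by cs.length - i
decreasing_by omega

def decode_cyclic (s : String) : String :=
  String.ofList (decode_cyclic_loop s.toList 0 [])

-- ===== PORT B =====
-- for ch in s: if len(buf) == 2 then emit ch ++ buf and clear buf else push ch onto buf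
def decode_cyclic_alt_step (st : List Char × List Char) (ch : Char) : List Char × List Char :=
  if st.2.length = 2 then (st.1 ++ ch :: st.2, []) else (st.1, st.2 ++ [ch])

def decode_cyclic_alt (s : String) : String :=
  let r := s.toList.foldl decode_cyclic_alt_step ([], [])
  String.ofList (r.1 ++ r.2)

-- ===== PRECONDITION & SPEC =====
def Spec_decode_cyclic (s : String) (out : String) : Prop := out = decode_cyclic_alt s
instance (s : String) (out : String) : Decidable (Spec_decode_cyclic s out) := by unfold Spec_decode_cyclic; infer_instance

-- ===== CLAIM (what is proved, stated in full; the proofs are below) =====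
def Claim_equal_decode_cyclic : Prop := ∀ (s : String), Dom_decode_cyclic s → Spec_decode_cyclic s (decode_cyclic s)

-- ===== LEMMAS AND PROOFS =====

-- reference decoding: rotate each complete 3-block, keep the short tail
def chunks : List Char → List Char
  | [] => []
  | [a] => [a]
  | [a, b] => [a, b]
  | a :: b :: c :: r => c :: a :: b :: chunks r

lemma chunks_short (l : List Char) (h : l.length < 3) : chunks l = l := by
  match l with
  | [] => rfl
  | [a] => rfl
  | [a, b] => rfl
  | a :: b :: c :: r => simp at h; omega

lemma loop_eq (cs : List Char) (i : Nat) (out : List (List Char)) :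
    decode_cyclic_loop cs i out = out.flatten ++ chunks (cs.drop i) := by
  induction i, out using decode_cyclic_loop.induct (cs := cs) with
  | case1 i out h x ih =>
    rw [decode_cyclic_loop]
    rw [dif_pos h]
    rw [ih]
    have hlen : 3 ≤ (cs.drop i).length := by simp; omega
    rcases e : cs.drop i with _ | ⟨a, _ | ⟨b, _ | ⟨c, r⟩⟩⟩ <;> rw [e] at hlen <;> simp at hlen
    have hc : PySem.List.pyGetD cs ((i : Int) + 2) ' ' = c := by
      have h2 : ((i : Int) + 2) = ((i + 2 : Nat) : Int) := by push_cast; ring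
      rw [h2, PySem.List.pyGetD_natCast]
      have hd : (cs.drop i)[2]? = cs[i + 2]? := List.getElem?_drop
      rw [e] at hd
      simp [List.getD_eq_getElem?_getD, ← hd]
    have hs : PySem.List.slice cs (some (i : Int)) (some ((i : Int) + 2)) = [a, b] := by
      have h2 : ((i : Int) + 2) = ((i : Int) + ((2 : Nat) : Int)) := by norm_num
      rw [h2, PySem.List.slice_natCast_add, e]
      simp
    have hr : cs.drop (i + 3) = r := by
      have hd : (cs.drop i).drop 3 = cs.drop (i + 3) := by
        rw [List.drop_drop, Nat.add_comm]
      rw [← hd, e]; rfl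
    rw [hr]
    simp only [x, hc, hs, chunks, List.flatten_append]
    simp
  | case2 i out h =>
    rw [decode_cyclic_loop]
    rw [dif_neg h]
    rw [PySem.List.slice_from_natCast]
    rw [chunks_short (cs.drop i) (by simp; omega)]

lemma A_eq (s : String) : decode_cyclic s = String.ofList (chunks s.toList) := by
  unfold decode_cyclic
  rw [loop_eq]
  simp

-- the streaming fold, started with an empty buffer, produces out ++ chunks cs
lemma fold_spec (cs : List Char) (out : List Char) :
    ((cs.foldl decode_cyclic_alt_step (out, [])).1 ++ (cs.foldl decode_cyclic_alt_step (out, [])).2)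
      = out ++ chunks cs := by
  induction cs using chunks.induct generalizing out with
  | case1 => simp [chunks]
  | case2 a => simp [chunks, decode_cyclic_alt_step]
  | case3 a b => simp [chunks, decode_cyclic_alt_step]
  | case4 a b c r ih =>
    have h3 : (a :: b :: c :: r).foldl decode_cyclic_alt_step (out, [])
        = r.foldl decode_cyclic_alt_step (out ++ [c, a, b], []) := by
      simp [decode_cyclic_alt_step]
    rw [h3, ih]
    simp [chunks]

lemma B_eq (s : String) : decode_cyclic_alt s = String.ofList (chunks s.toList) := by
  show String.ofList _ = _
  rw [fold_spec s.toList []]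
  simp

-- ===== VERDICT (by name: the statement is the Claim_ definition above) =====
theorem decode_cyclic_spec : Claim_equal_decode_cyclic := by
  intro s _
  unfold Spec_decode_cyclic
  rw [A_eq, B_eq]
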